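-- pv_equiv track=rewrite | github.com/ericzastoupil/advent_of_code | 2023/Day1/part2/solution.py | find_first_word
-- ===== SOURCE A (Python) =====
-- def find_first_word(words, line):
--     idx = -1
--     final_word = ''
--     for word in words:
--         if word in line:
--             if idx == -1 or line.find(word) < idx:
--                 idx = line.find(word)
--                 final_word = word
--
--     return final_word, idx
-- ===== SOURCE B (Python) =====
-- def find_first_word(words, line):
--     # position-centric scan: walk the line left to right and return the first
--     # word (in list order) that starts at the earliest position
--     for i in range(len(line) + 1):
--         for word in words:
--             if line.startswith(word, i):
--                 return word, i
--     return '', -1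
-- ===== Notes on version B (the rewrite author's own statement) =====
-- stated objective: faster
-- what changed: Replaces the word-centric loop that repeatedly scans the whole line with line.find and tracks a running minimum by a position-centric left-to-right scan of the line that returns as soon as the earliest-starting word is found (early exit, no full-line scans).
import Mathlib
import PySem

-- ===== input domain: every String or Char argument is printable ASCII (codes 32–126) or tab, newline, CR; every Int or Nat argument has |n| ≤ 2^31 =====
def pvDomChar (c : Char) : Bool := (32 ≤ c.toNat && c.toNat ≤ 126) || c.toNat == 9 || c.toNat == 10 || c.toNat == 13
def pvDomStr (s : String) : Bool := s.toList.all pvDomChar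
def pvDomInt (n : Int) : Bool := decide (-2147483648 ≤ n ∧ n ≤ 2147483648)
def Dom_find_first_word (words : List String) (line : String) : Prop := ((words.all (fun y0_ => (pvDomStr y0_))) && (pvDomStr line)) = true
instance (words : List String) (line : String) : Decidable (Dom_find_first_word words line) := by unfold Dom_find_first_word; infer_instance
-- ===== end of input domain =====

-- B replaces A's word-centric repeated-find minimum tracking with a position-centric
-- left-to-right scan of the line (alternative decomposition, same result).

-- ===== PORT A =====
-- literal transliteration: fold over words carrying (final_word, idx)
def find_first_word (words : List String) (line : String) : String × Int :=
  words.foldl (fun st word =>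
    if PySem.Str.isIn word line then
      if st.2 == -1 || decide (PySem.Str.find line word < st.2) then
        (word, PySem.Str.find line word)
      else st
    else st) ("", -1)

-- ===== PORT B =====
-- outer loop 'for i in range(len(line)+1)' with early return → fuel recursion over the
-- remaining positions; inner loop with early return → List.find?.
-- 'line.startswith(word, i)' (0 ≤ i) is exactly startswith on line.toList.drop i.
def altGo (words : List String) (cs : List Char) (i : Nat) : Nat → String × Int
  | 0 => ("", -1)
  | fuel + 1 =>
    match words.find? (fun w => PySem.Chars.startswith (cs.drop i) w.toList) with
    | some w => (w, (i : Int))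
    | none => altGo words cs (i + 1) fuel

def find_first_word_alt (words : List String) (line : String) : String × Int :=
  altGo words line.toList 0 (line.toList.length + 1)

-- ===== PRECONDITION & SPEC =====
def Spec_find_first_word (words : List String) (line : String) (out : String × Int) : Prop := out = find_first_word_alt words line
instance (words : List String) (line : String) (out : String × Int) : Decidable (Spec_find_first_word words line out) := by unfold Spec_find_first_word; infer_instance

-- ===== CLAIM (what is proved, stated in full; the proofs are below) =====
def Claim_equal_find_first_word : Prop := ∀ (words : List String) (line : String), Dom_find_first_word words line → Spec_find_first_word words line (find_first_word words line)

-- ===== LEMMAS AND PROOFS =====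

-- a prefix of a drop is an infix
lemma prefix_drop_infix {w cs : List Char} {j : Nat} (h : w <+: cs.drop j) : w <:+: cs :=
  h.isInfix.trans (cs.drop_suffix j).isInfix

-- a prefix at position j means find ≤ j
lemma find_le_of_prefix_drop {w cs : List Char} {j : Nat} (h : w <+: cs.drop j) :
    PySem.Chars.find cs w ≤ (j : Int) := by
  have hinf : w <:+: cs := prefix_drop_infix h
  have hnn : 0 ≤ PySem.Chars.find cs w := (PySem.Chars.find_nonneg_iff cs w).2 hinf
  by_contra hlt
  push Not at hlt
  have hj : j < (PySem.Chars.find cs w).toNat := by omega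
  exact (PySem.Chars.find_spec hnn).2 j hj h

-- A's fold body, named for the proofs (definitionally equal to the lambda in the port)
def Astep (line : String) (st : String × Int) (word : String) : String × Int :=
  if PySem.Str.isIn word line then
    if st.2 == -1 || decide (PySem.Str.find line word < st.2) then
      (word, PySem.Str.find line word)
    else st
  else st

-- characterization of A's fold: either nothing matched, or the result is the first
-- word attaining the minimal find-index among the matched words
lemma A_inv (line : String) (ws : List String) :
    (ws.foldl (Astep line) ("", -1) = (("", -1) : String × Int) ∧
      ∀ w ∈ ws, ¬ w.toList <:+: line.toList) ∨
    (∃ l rest, ws = l ++ (ws.foldl (Astep line) ("", -1)).1 :: rest ∧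
      (ws.foldl (Astep line) ("", -1)).1.toList <:+: line.toList ∧
      (ws.foldl (Astep line) ("", -1)).2
        = PySem.Chars.find line.toList (ws.foldl (Astep line) ("", -1)).1.toList ∧
      (∀ w ∈ l, w.toList <:+: line.toList →
        (ws.foldl (Astep line) ("", -1)).2 < PySem.Chars.find line.toList w.toList) ∧
      (∀ w ∈ ws, w.toList <:+: line.toList →
        (ws.foldl (Astep line) ("", -1)).2 ≤ PySem.Chars.find line.toList w.toList)) := by
  induction ws using List.reverseRecOn with
  | nil => left; exact ⟨rfl, by simp⟩
  | append_singleton ws w ih =>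
    simp only [List.foldl_append, List.foldl_cons, List.foldl_nil]
    by_cases hM : w.toList <:+: line.toList
    · have hisIn : PySem.Str.isIn w line = true := by
        rw [PySem.Str.isIn_eq]; exact (PySem.Chars.isIn_iff_infix _ _).2 hM
      have hfindw : PySem.Str.find line w = PySem.Chars.find line.toList w.toList :=
        PySem.Str.find_eq _ _
      have hisInC : PySem.Chars.isIn w.toList line.toList = true :=
        (PySem.Chars.isIn_iff_infix _ _).2 hM
      rcases ih with ⟨hre, hnone⟩ | ⟨l, rest, hsplit, hMr, hFr, hlt, hle⟩
      · have hstep : Astep line (ws.foldl (Astep line) ("", -1)) w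
            = (w, PySem.Str.find line w) := by
          rw [hre]; simp [Astep, hisInC]
        rw [hstep]
        right
        refine ⟨ws, [], by simp, hM, hfindw, ?_, ?_⟩
        · intro u hu hMu; exact absurd hMu (hnone u hu)
        · intro u hu hMu
          rcases List.mem_append.1 hu with hu | hu
          · exact absurd hMu (hnone u hu)
          · simp only [List.mem_singleton] at hu; subst hu
            rw [hfindw]
      · have hnn : 0 ≤ (ws.foldl (Astep line) ("", -1)).2 := by
          rw [hFr]; exact (PySem.Chars.find_nonneg_iff _ _).2 hMr
        have hne : ((ws.foldl (Astep line) ("", -1)).2 == (-1 : Int)) = false := by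
          simp only [beq_eq_false_iff_ne, ne_eq]; omega
        by_cases hflt : PySem.Str.find line w < (ws.foldl (Astep line) ("", -1)).2
        · have hstep : Astep line (ws.foldl (Astep line) ("", -1)) w
              = (w, PySem.Str.find line w) := by
            have hfltC : PySem.Chars.find line.toList w.toList
                < (ws.foldl (Astep line) ("", -1)).2 := by rw [← hfindw]; exact hflt
            simp [Astep, hisInC, hne, hfltC]
          rw [hstep]
          right
          refine ⟨ws, [], by simp, hM, hfindw, ?_, ?_⟩
          · intro u hu hMu
            have := hle u (hsplit ▸ (by rw [← hsplit]; exact hu)) hMu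
            rw [hfindw]; omega
          · intro u hu hMu
            rcases List.mem_append.1 hu with hu | hu
            · have := hle u hu hMu
              rw [hfindw]; omega
            · simp only [List.mem_singleton] at hu; subst hu
              rw [hfindw]
        · have hstep : Astep line (ws.foldl (Astep line) ("", -1)) w
              = ws.foldl (Astep line) ("", -1) := by
            have hfltC : ¬ PySem.Chars.find line.toList w.toList
                < (ws.foldl (Astep line) ("", -1)).2 := by rw [← hfindw]; exact hflt
            simp [Astep, hisInC, hne, hfltC]
          rw [hstep]
          right
          have hsplit' : ws ++ [w]
              = l ++ (ws.foldl (Astep line) ("", -1)).1 :: (rest ++ [w]) := by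
            conv_lhs => rw [hsplit]
            simp
          refine ⟨l, rest ++ [w], hsplit', hMr, hFr, hlt, ?_⟩
          intro u hu hMu
          rcases List.mem_append.1 hu with hu | hu
          · exact hle u hu hMu
          · simp only [List.mem_singleton] at hu; subst hu
            have hq : ¬ PySem.Chars.find line.toList u.toList
                < (ws.foldl (Astep line) ("", -1)).2 := by simpa [hfindw] using hflt
            omega
    · have hisInC : PySem.Chars.isIn w.toList line.toList = false :=
        (PySem.Chars.isIn_eq_false_iff _ _).2 hM
      have hstep : Astep line (ws.foldl (Astep line) ("", -1)) w
          = ws.foldl (Astep line) ("", -1) := by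
        simp [Astep, hisInC]
      rw [hstep]
      rcases ih with ⟨hre, hnone⟩ | ⟨l, rest, hsplit, hMr, hFr, hlt, hle⟩
      · left
        refine ⟨hre, ?_⟩
        intro u hu
        rcases List.mem_append.1 hu with hu | hu
        · exact hnone u hu
        · simp only [List.mem_singleton] at hu; subst hu; exact hM
      · right
        have hsplit' : ws ++ [w]
            = l ++ (ws.foldl (Astep line) ("", -1)).1 :: (rest ++ [w]) := by
          conv_lhs => rw [hsplit]
          simp
        refine ⟨l, rest ++ [w], hsplit', hMr, hFr, hlt, ?_⟩
        intro u hu hMu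
        rcases List.mem_append.1 hu with hu | hu
        · exact hle u hu hMu
        · simp only [List.mem_singleton] at hu; subst hu; exact absurd hMu hM

-- B returns ("",-1) when nothing matches anywhere in the scanned window
lemma B_none (words : List String) (cs : List Char) (fuel : Nat) :
    ∀ i : Nat, (∀ j : Nat, i ≤ j → j < i + fuel → ∀ w ∈ words, ¬ w.toList <+: cs.drop j) →
    altGo words cs i fuel = ("", -1) := by
  induction fuel with
  | zero => intro i _; rfl
  | succ fuel ih =>
    intro i h
    have hnone : words.find? (fun w => PySem.Chars.startswith (cs.drop i) w.toList) = none := by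
      rw [List.find?_eq_none]
      intro w hw hpre
      exact h i le_rfl (by omega) w hw ((PySem.Chars.startswith_iff _ _).1 hpre)
    simp only [altGo, hnone]
    exact ih (i + 1) (fun j h1 h2 w hw => h j (by omega) (by omega) w hw)

-- B hits the first matching position
lemma B_hit (words : List String) (cs : List Char) (k : Nat) (wstar : String)
    (hbefore : ∀ j : Nat, j < k → ∀ w ∈ words, ¬ w.toList <+: cs.drop j)
    (hfind : words.find? (fun w => PySem.Chars.startswith (cs.drop k) w.toList) = some wstar) :
    ∀ (fuel i : Nat), i ≤ k → k < i + fuel →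
    altGo words cs i fuel = (wstar, (k : Int)) := by
  intro fuel
  induction fuel with
  | zero => intro i _ h2; omega
  | succ fuel ih =>
    intro i h1 h2
    by_cases hik : i = k
    · subst hik
      simp only [altGo, hfind]
    · have hnone : words.find? (fun w => PySem.Chars.startswith (cs.drop i) w.toList) = none := by
        rw [List.find?_eq_none]
        intro w hw hpre
        exact hbefore i (by omega) w hw ((PySem.Chars.startswith_iff _ _).1 hpre)
      simp only [altGo, hnone]
      exact ih (i + 1) (by omega) (by omega)

-- ===== VERDICT (by name: the statement is the Claim_ definition above) =====
theorem find_first_word_spec : Claim_equal_find_first_word := by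
  intro words line _
  show (words.foldl (Astep line) ("", -1) : String × Int)
      = altGo words line.toList 0 (line.toList.length + 1)
  rcases A_inv line words with ⟨hre, hnone⟩ | ⟨l, rest, hsplit, hMr, hFr, hlt, hle⟩
  · rw [hre]
    symm
    apply B_none
    intro j _ _ w hw hpre
    exact hnone w hw (prefix_drop_infix hpre)
  · set r := words.foldl (Astep line) ("", -1) with hr
    have hnn : 0 ≤ r.2 := by rw [hFr]; exact (PySem.Chars.find_nonneg_iff _ _).2 hMr
    have hklen : r.2 ≤ (line.toList.length : Int) := by
      rw [hFr]; exact PySem.Chars.find_le_length _ _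
    have hbefore : ∀ j : Nat, j < r.2.toNat → ∀ w ∈ words, ¬ w.toList <+: line.toList.drop j := by
      intro j hj w hw hpre
      have h1 := find_le_of_prefix_drop hpre
      have h2 := hle w hw (prefix_drop_infix hpre)
      omega
    have hfind : words.find?
        (fun w => PySem.Chars.startswith (line.toList.drop r.2.toNat) w.toList) = some r.1 := by
      rw [hsplit, List.find?_append]
      have hl : l.find?
          (fun w => PySem.Chars.startswith (line.toList.drop r.2.toNat) w.toList) = none := by
        rw [List.find?_eq_none]
        intro w hw hpre
        have hpre' := (PySem.Chars.startswith_iff _ _).1 hpre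
        have h1 := find_le_of_prefix_drop hpre'
        have h2 := hlt w hw (prefix_drop_infix hpre')
        omega
      rw [hl, Option.none_or]
      apply List.find?_cons_of_pos
      apply (PySem.Chars.startswith_iff _ _).2
      have := (PySem.Chars.find_spec (s := line.toList) (sub := r.1.toList) (hFr ▸ hnn)).1
      rw [← hFr] at this
      exact this
    have := B_hit words line.toList r.2.toNat r.1 hbefore hfind
        (line.toList.length + 1) 0 (by omega) (by omega)
    rw [this]
    have : ((r.2.toNat : Int)) = r.2 := Int.toNat_of_nonneg hnn
    rw [this]
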